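-- pv_equiv track=rewrite | github.com/BananaMoustache/nuclei2dojo | proc/pipeline.py | _build_tags_for_technologies
-- ===== SOURCE A (Python) =====
-- from typing import Dict, List, Optional, Set, Tuple
--
-- def _build_tags_for_technologies(techs: List[str]) -> Set[str]:
--     tags: Set[str] = set()
--     low = [t.lower() for t in (techs or [])]
--
--     if any("wordpress" in t for t in low):
--         tags.update({"wordpress", "wp", "php"})
--     if any("php" in t for t in low):
--         tags.add("php")
--     if any(("asp.net" in t) or ("aspnet" in t) for t in low):
--         tags.add("aspnet")
--     if any("iis" in t for t in low):
--         tags.update({"iis", "microsoft", "windows"})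
--     if any("nginx" in t for t in low):
--         tags.add("nginx")
--     if any(("ubuntu" in t) or ("debian" in t) or ("centos" in t) or ("red hat" in t) or ("redhat" in t) for t in low):
--         tags.add("linux")
--     if any("windows server" in t for t in low):
--         tags.add("windows")
--
--     if any("laravel" in t for t in low):
--         tags.update({"laravel", "php"})
--     if any("django" in t for t in low):
--         tags.update({"django", "python"})
--     if any("flask" in t for t in low):
--         tags.update({"flask", "python"})
--     if any("drupal" in t for t in low):
--         tags.update({"drupal", "php"})
--     if any("joomla" in t for t in low):
--         tags.update({"joomla", "php"})
--
--     if any("jquery" in t for t in low):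
--         tags.update({"jquery", "javascript", "js"})
--     if any("react" in t for t in low):
--         tags.update({"react", "javascript", "js"})
--     if any(("vue.js" in t) or ("vuejs" in t) or (t.strip() == "vue") for t in low):
--         tags.update({"vue", "javascript", "js"})
--     if any("angular" in t for t in low):
--         tags.update({"angular", "javascript", "js"})
--     if any(("node.js" in t) or ("nodejs" in t) or (t.strip() == "node") for t in low):
--         tags.update({"nodejs", "javascript", "js"})
--     if any(("nuxt.js" in t) or ("nuxtjs" in t) or (t.strip() == "nuxt") for t in low):
--         tags.update({"nuxt", "javascript", "js"})
--
--     if not tags: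
--         tags.add("tech")
--
--     return tags
-- ===== SOURCE B (Python) =====
-- # Different algorithm: instead of testing every keyword against every tech with `in`,
-- # do a multi-pattern substring search: slide a window over each lowered tech and look the
-- # window up in a keyword->rule-index dict (one hash lookup per window per keyword length),
-- # plus a stripped-string lookup in an exact-match dict; collect fired rule indices, then
-- # union the tags of the fired rules in rule order.
--
-- _KEYWORD_RULE = {
--     "wordpress": 0, "php": 1, "asp.net": 2, "aspnet": 2, "iis": 3, "nginx": 4,
--     "ubuntu": 5, "debian": 5, "centos": 5, "red hat": 5, "redhat": 5,
--     "windows server": 6, "laravel": 7, "django": 8, "flask": 9, "drupal": 10,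
--     "joomla": 11, "jquery": 12, "react": 13, "vue.js": 14, "vuejs": 14,
--     "angular": 15, "node.js": 16, "nodejs": 16, "nuxt.js": 17, "nuxtjs": 17,
-- }
-- _EXACT_RULE = {"vue": 14, "node": 16, "nuxt": 17}
-- _LENS = sorted({len(k) for k in _KEYWORD_RULE})
-- _RULE_TAGS = [
--     ("wordpress", "wp", "php"), ("php",), ("aspnet",), ("iis", "microsoft", "windows"),
--     ("nginx",), ("linux",), ("windows",), ("laravel", "php"), ("django", "python"),
--     ("flask", "python"), ("drupal", "php"), ("joomla", "php"),
--     ("jquery", "javascript", "js"), ("react", "javascript", "js"),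
--     ("vue", "javascript", "js"), ("angular", "javascript", "js"),
--     ("nodejs", "javascript", "js"), ("nuxt", "javascript", "js"),
-- ]
--
--
-- def _build_tags_for_technologies(techs):
--     fired = set()
--     for t in (techs or []):
--         t = t.lower()
--         for i in range(len(t)):
--             for L in _LENS:
--                 r = _KEYWORD_RULE.get(t[i:i + L])
--                 if r is not None:
--                     fired.add(r)
--         r = _EXACT_RULE.get(t.strip())
--         if r is not None:
--             fired.add(r)
--     tags = set()
--     for r, rt in enumerate(_RULE_TAGS):
--         if r in fired:
--             tags.update(rt)
--     return tags or {"tech"}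
-- ===== Notes on version B (the rewrite author's own statement) =====
-- stated objective: alternative
-- what changed: Replaced A's eighteen per-keyword `substring in tech` scans by a multi-pattern sliding-window search: each lowered tech is scanned once and every window is looked up in a keyword->rule-index hash table (plus one stripped-string lookup in an exact-match table); the tags of the fired rules are then unioned in rule order.
import Mathlib
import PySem

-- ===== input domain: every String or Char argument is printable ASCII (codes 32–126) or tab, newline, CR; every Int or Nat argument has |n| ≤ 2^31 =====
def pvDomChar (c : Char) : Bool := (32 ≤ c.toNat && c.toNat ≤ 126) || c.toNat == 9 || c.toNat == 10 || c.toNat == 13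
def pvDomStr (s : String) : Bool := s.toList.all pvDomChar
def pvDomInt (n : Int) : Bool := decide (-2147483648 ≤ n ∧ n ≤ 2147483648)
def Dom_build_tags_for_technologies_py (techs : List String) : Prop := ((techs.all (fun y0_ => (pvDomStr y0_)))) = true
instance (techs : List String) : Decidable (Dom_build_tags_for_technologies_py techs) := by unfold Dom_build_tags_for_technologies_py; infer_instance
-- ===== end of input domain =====

-- B replaces A's per-keyword `in` tests by a multi-pattern sliding-window search: each lowered tech is scanned once, every window is looked up in a keyword->rule dict (plus a stripped-string exact dict), and the tags of the fired rules are unioned in rule order (alternative algorithm; no speed claim).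


-- ===== PORT A =====
def build_tags_for_technologies_py (techs : List String) : List String :=
  let low := techs.map (fun t => PySem.Str.lower t)
  let tags : PySem.Set String := PySem.Set.empty
  let tags := if low.any (fun t => PySem.Str.isIn "wordpress" t) then tags.update ["wordpress", "wp", "php"] else tags
  let tags := if low.any (fun t => PySem.Str.isIn "php" t) then tags.add "php" else tags
  let tags := if low.any (fun t => PySem.Str.isIn "asp.net" t || PySem.Str.isIn "aspnet" t) then tags.add "aspnet" else tags
  let tags := if low.any (fun t => PySem.Str.isIn "iis" t) then tags.update ["iis", "microsoft", "windows"] else tags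
  let tags := if low.any (fun t => PySem.Str.isIn "nginx" t) then tags.add "nginx" else tags
  let tags := if low.any (fun t => PySem.Str.isIn "ubuntu" t || PySem.Str.isIn "debian" t || PySem.Str.isIn "centos" t || PySem.Str.isIn "red hat" t || PySem.Str.isIn "redhat" t) then tags.add "linux" else tags
  let tags := if low.any (fun t => PySem.Str.isIn "windows server" t) then tags.add "windows" else tags
  let tags := if low.any (fun t => PySem.Str.isIn "laravel" t) then tags.update ["laravel", "php"] else tags
  let tags := if low.any (fun t => PySem.Str.isIn "django" t) then tags.update ["django", "python"] else tags
  let tags := if low.any (fun t => PySem.Str.isIn "flask" t) then tags.update ["flask", "python"] else tags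
  let tags := if low.any (fun t => PySem.Str.isIn "drupal" t) then tags.update ["drupal", "php"] else tags
  let tags := if low.any (fun t => PySem.Str.isIn "joomla" t) then tags.update ["joomla", "php"] else tags
  let tags := if low.any (fun t => PySem.Str.isIn "jquery" t) then tags.update ["jquery", "javascript", "js"] else tags
  let tags := if low.any (fun t => PySem.Str.isIn "react" t) then tags.update ["react", "javascript", "js"] else tags
  let tags := if low.any (fun t => PySem.Str.isIn "vue.js" t || PySem.Str.isIn "vuejs" t || (PySem.Str.strip t == "vue")) then tags.update ["vue", "javascript", "js"] else tags
  let tags := if low.any (fun t => PySem.Str.isIn "angular" t) then tags.update ["angular", "javascript", "js"] else tags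
  let tags := if low.any (fun t => PySem.Str.isIn "node.js" t || PySem.Str.isIn "nodejs" t || (PySem.Str.strip t == "node")) then tags.update ["nodejs", "javascript", "js"] else tags
  let tags := if low.any (fun t => PySem.Str.isIn "nuxt.js" t || PySem.Str.isIn "nuxtjs" t || (PySem.Str.strip t == "nuxt")) then tags.update ["nuxt", "javascript", "js"] else tags
  let tags := if tags.isEmpty then tags.add "tech" else tags
  tags

-- ===== PORT B =====
-- Source B's keyword -> rule-index dict (literal dict, unique keys)
def pvKeyPairs : List (String × Int) :=
  [("wordpress", 0), ("php", 1), ("asp.net", 2), ("aspnet", 2), ("iis", 3), ("nginx", 4),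
   ("ubuntu", 5), ("debian", 5), ("centos", 5), ("red hat", 5), ("redhat", 5),
   ("windows server", 6), ("laravel", 7), ("django", 8), ("flask", 9), ("drupal", 10),
   ("joomla", 11), ("jquery", 12), ("react", 13), ("vue.js", 14), ("vuejs", 14),
   ("angular", 15), ("node.js", 16), ("nodejs", 16), ("nuxt.js", 17), ("nuxtjs", 17)]
def pvKeyRule : PySem.Dict String Int := PySem.Dict.mk pvKeyPairs
def pvExactPairs : List (String × Int) := [("vue", 14), ("node", 16), ("nuxt", 17)]
def pvExactRule : PySem.Dict String Int := PySem.Dict.mk pvExactPairs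
-- _LENS = sorted({len(k) for k in _KEYWORD_RULE}) = [3, 5, 6, 7, 9, 14]
def pvLens : List Int := [3, 5, 6, 7, 9, 14]
def pvRuleTags : List (List String) :=
  [["wordpress", "wp", "php"], ["php"], ["aspnet"], ["iis", "microsoft", "windows"],
   ["nginx"], ["linux"], ["windows"], ["laravel", "php"], ["django", "python"],
   ["flask", "python"], ["drupal", "php"], ["joomla", "php"],
   ["jquery", "javascript", "js"], ["react", "javascript", "js"],
   ["vue", "javascript", "js"], ["angular", "javascript", "js"],
   ["nodejs", "javascript", "js"], ["nuxt", "javascript", "js"]]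

-- the sliding-window half of Source B's per-tech loop: look every window up in the keyword dict
def pvScanWin (fired : PySem.Set Int) (tl : String) : PySem.Set Int :=
  (PySem.List.pyRange 0 (PySem.Str.len tl) 1).foldl
    (fun fired i => pvLens.foldl
      (fun fired L =>
        match pvKeyRule.get? (PySem.Str.slice tl (some i) (some (i + L))) with
        | some r => PySem.Set.add fired r
        | none => fired)
      fired)
    fired

-- the body of Source B's `for t in techs` loop: window lookups plus the exact-match lookup
def pvScan (fired : PySem.Set Int) (t : String) : PySem.Set Int :=
  match pvExactRule.get? (PySem.Str.strip (PySem.Str.lower t)) with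
  | some r => PySem.Set.add (pvScanWin fired (PySem.Str.lower t)) r
  | none => pvScanWin fired (PySem.Str.lower t)

def build_tags_for_technologies_py_alt (techs : List String) : List String :=
  let fired := techs.foldl pvScan PySem.Set.empty
  let tags := (PySem.List.enumerate pvRuleTags).foldl
    (fun (tags : PySem.Set String) p =>
      if PySem.Set.contains fired p.1 then tags.update p.2 else tags)
    PySem.Set.empty
  if tags.isEmpty then ["tech"] else tags

-- ===== PRECONDITION & SPEC =====
def Spec_build_tags_for_technologies_py (techs : List String) (out : List String) : Prop := out = build_tags_for_technologies_py_alt techs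
instance (techs : List String) (out : List String) : Decidable (Spec_build_tags_for_technologies_py techs out) := by unfold Spec_build_tags_for_technologies_py; infer_instance

-- ===== CLAIM (what is proved, stated in full; the proofs are below) =====
def Claim_equal_build_tags_for_technologies_py : Prop := ∀ (techs : List String), Dom_build_tags_for_technologies_py techs → Spec_build_tags_for_technologies_py techs (build_tags_for_technologies_py techs)

-- ===== LEMMAS AND PROOFS =====

-- A's 18 rule conditions as data: (predicate on a lowered tech, tags)
def pvRulesA : List ((String → Bool) × List String) :=
  [ ((fun t => PySem.Str.isIn "wordpress" t), ["wordpress", "wp", "php"]),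
    ((fun t => PySem.Str.isIn "php" t), ["php"]),
    ((fun t => PySem.Str.isIn "asp.net" t || PySem.Str.isIn "aspnet" t), ["aspnet"]),
    ((fun t => PySem.Str.isIn "iis" t), ["iis", "microsoft", "windows"]),
    ((fun t => PySem.Str.isIn "nginx" t), ["nginx"]),
    ((fun t => PySem.Str.isIn "ubuntu" t || PySem.Str.isIn "debian" t || PySem.Str.isIn "centos" t || PySem.Str.isIn "red hat" t || PySem.Str.isIn "redhat" t), ["linux"]),
    ((fun t => PySem.Str.isIn "windows server" t), ["windows"]),
    ((fun t => PySem.Str.isIn "laravel" t), ["laravel", "php"]),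
    ((fun t => PySem.Str.isIn "django" t), ["django", "python"]),
    ((fun t => PySem.Str.isIn "flask" t), ["flask", "python"]),
    ((fun t => PySem.Str.isIn "drupal" t), ["drupal", "php"]),
    ((fun t => PySem.Str.isIn "joomla" t), ["joomla", "php"]),
    ((fun t => PySem.Str.isIn "jquery" t), ["jquery", "javascript", "js"]),
    ((fun t => PySem.Str.isIn "react" t), ["react", "javascript", "js"]),
    ((fun t => PySem.Str.isIn "vue.js" t || PySem.Str.isIn "vuejs" t || (PySem.Str.strip t == "vue")), ["vue", "javascript", "js"]),
    ((fun t => PySem.Str.isIn "angular" t), ["angular", "javascript", "js"]),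
    ((fun t => PySem.Str.isIn "node.js" t || PySem.Str.isIn "nodejs" t || (PySem.Str.strip t == "node")), ["nodejs", "javascript", "js"]),
    ((fun t => PySem.Str.isIn "nuxt.js" t || PySem.Str.isIn "nuxtjs" t || (PySem.Str.strip t == "nuxt")), ["nuxt", "javascript", "js"]) ]

def pvStepA (low : List String) (s : PySem.Set String) (r : (String → Bool) × List String) : PySem.Set String :=
  if low.any r.1 then s.update r.2 else s

-- A's body IS the fold over pvRulesA, definitionally
theorem pvA_eq_fold (techs : List String) :
    build_tags_for_technologies_py techs =
      (let low := techs.map (fun t => PySem.Str.lower t)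
       let tags := pvRulesA.foldl (pvStepA low) PySem.Set.empty
       if tags.isEmpty then tags.add "tech" else tags) := rfl

theorem pvFoldl_rel {α β γ : Type} (f : γ → α → γ) (g : γ → β → γ) :
    ∀ (l1 : List α) (l2 : List β), List.Forall₂ (fun a b => ∀ s, f s a = g s b) l1 l2 →
      ∀ s, List.foldl f s l1 = List.foldl g s l2 := by
  intro l1 l2 h
  induction h with
  | nil => intro s; rfl
  | cons hab _ ih => intro s; simp only [List.foldl_cons]; rw [hab s]; exact ih _

-- membership in a fold whose step adds an s-independent set of elements
theorem pvMemFold {β : Type} (g : PySem.Set Int → β → PySem.Set Int) (P : Int → β → Prop)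
    (hg : ∀ s b y, y ∈ g s b ↔ y ∈ s ∨ P y b) :
    ∀ (l : List β) (s : PySem.Set Int) (y : Int),
      y ∈ l.foldl g s ↔ y ∈ s ∨ ∃ b ∈ l, P y b := by
  intro l
  induction l with
  | nil => simp
  | cons b l ih =>
    intro s y
    simp only [List.foldl_cons, ih, hg, List.mem_cons]
    constructor
    · rintro ((h | h) | ⟨c, hc, h⟩)
      · exact Or.inl h
      · exact Or.inr ⟨b, Or.inl rfl, h⟩
      · exact Or.inr ⟨c, Or.inr hc, h⟩
    · rintro (h | ⟨c, (rfl | hc), h⟩)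
      · exact Or.inl (Or.inl h)
      · exact Or.inl (Or.inr h)
      · exact Or.inr ⟨c, hc, h⟩

-- first-match lookup in a dict with distinct keys, as a search through the pair list
theorem pvGetMk (pairs : List (String × Int)) (h : (pairs.map Prod.fst).Nodup) (w : String) (q : Int) :
    (PySem.Dict.mk pairs).get? w = some q ↔ ∃ p ∈ pairs, p.1 = w ∧ p.2 = q := by
  induction pairs with
  | nil => simp [PySem.Dict.get?]
  | cons p rest ih =>
    simp only [List.map_cons, List.nodup_cons, List.mem_map] at h
    rw [PySem.Dict.get?_mk_cons]
    by_cases hw : p.1 = w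
    · subst hw
      simp only [BEq.rfl, if_true, List.mem_cons]
      constructor
      · rintro h'; exact ⟨p, Or.inl rfl, rfl, by simpa using h'⟩
      · rintro ⟨c, (rfl | hc), h1, h2⟩
        · simp [h2]
        · exact absurd ⟨c, hc, h1⟩ h.1
    · rw [if_neg (by simpa using hw), ih h.2]
      simp only [List.mem_cons]
      constructor
      · rintro ⟨c, hc, hh⟩; exact ⟨c, Or.inr hc, hh⟩
      · rintro ⟨c, (rfl | hc), h1, h2⟩
        · exact absurd h1 hw
        · exact ⟨c, hc, h1, h2⟩

-- a window equal to a keyword of a length in pvLens is exactly a substring occurrence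
theorem pvOccurs_iff (kw tl : String) (h1 : kw.toList ≠ [])
    (h2 : ((kw.toList.length : Int)) ∈ pvLens) :
    (∃ i ∈ PySem.List.pyRange 0 (PySem.Str.len tl) 1, ∃ L ∈ pvLens,
        PySem.Str.slice tl (some i) (some (i + L)) = kw)
      ↔ PySem.Str.isIn kw tl = true := by
  rw [PySem.Str.isIn_iff_infix]
  constructor
  · rintro ⟨i, hi, L, hL, hs⟩
    rw [PySem.List.mem_pyRange_one] at hi
    have hL0 : 0 ≤ L := by fin_cases hL <;> norm_num
    have h0i : 0 ≤ i := hi.1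
    have := congrArg String.toList hs
    rw [PySem.Str.toList_slice, PySem.Chars.slice_eq_listSlice,
        PySem.List.slice_toNat _ h0i (by omega)] at this
    rw [← this]
    exact ((List.take_prefix _ _).isInfix.trans (tl.toList.drop_suffix _).isInfix)
  · intro hinf
    have hisin : PySem.Chars.isIn kw.toList tl.toList = true := by
      rw [PySem.Chars.isIn_iff_infix]; exact hinf
    obtain ⟨j, hj⟩ := (PySem.Chars.exists_prefix_drop_iff_isIn _ _).mpr hisin
    have hjlt : j < tl.toList.length := by
      by_contra hge
      rw [List.drop_eq_nil_of_le (by omega)] at hj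
      exact h1 (List.prefix_nil.mp hj)
    refine ⟨(j : Int), ?_, (kw.toList.length : Int), h2, ?_⟩
    · rw [PySem.List.mem_pyRange_one, PySem.Str.len_eq]
      omega
    · apply String.toList_inj.mp
      rw [PySem.Str.toList_slice, PySem.Chars.slice_eq_listSlice,
          PySem.List.slice_natCast_add]
      exact (List.prefix_iff_eq_take.mp hj).symm

-- which rule indices one (already lowered) tech fires
def pvHits (r : Int) (t : String) : Prop :=
  (∃ p ∈ pvKeyPairs, p.2 = r ∧ PySem.Str.isIn p.1 (PySem.Str.lower t) = true) ∨
    pvExactRule.get? (PySem.Str.strip (PySem.Str.lower t)) = some r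

theorem pvKeyNodup : (pvKeyPairs.map Prod.fst).Nodup := by decide
theorem pvExactNodup : (pvExactPairs.map Prod.fst).Nodup := by decide
theorem pvKeyGood : ∀ p ∈ pvKeyPairs, p.1.toList ≠ [] ∧ ((p.1.toList.length : Int)) ∈ pvLens := by decide

theorem pvScanWin_mem (fired : PySem.Set Int) (tl : String) (y : Int) :
    y ∈ pvScanWin fired tl ↔ y ∈ fired ∨ ∃ i ∈ PySem.List.pyRange 0 (PySem.Str.len tl) 1,
      ∃ L ∈ pvLens, pvKeyRule.get? (PySem.Str.slice tl (some i) (some (i + L))) = some y := by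
  unfold pvScanWin
  refine pvMemFold _
    (fun y i => ∃ L ∈ pvLens, pvKeyRule.get? (PySem.Str.slice tl (some i) (some (i + L))) = some y)
    (fun s i y => ?_) _ fired y
  refine pvMemFold _
    (fun y L => pvKeyRule.get? (PySem.Str.slice tl (some i) (some (i + L))) = some y)
    (fun s L y => ?_) pvLens s y
  cases h : pvKeyRule.get? (PySem.Str.slice tl (some i) (some (i + L))) with
  | none => simp [h]
  | some r' => simp [h, PySem.Set.mem_add, eq_comm]

theorem pvWinHit_iff (tl : String) (r : Int) :
    (∃ i ∈ PySem.List.pyRange 0 (PySem.Str.len tl) 1,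
        ∃ L ∈ pvLens, pvKeyRule.get? (PySem.Str.slice tl (some i) (some (i + L))) = some r)
      ↔ ∃ p ∈ pvKeyPairs, p.2 = r ∧ PySem.Str.isIn p.1 tl = true := by
  constructor
  · rintro ⟨i, hi, L, hL, hget⟩
    rw [show pvKeyRule = PySem.Dict.mk pvKeyPairs from rfl, pvGetMk _ pvKeyNodup] at hget
    obtain ⟨p, hp, hw, hv⟩ := hget
    refine ⟨p, hp, hv, ?_⟩
    rw [← (pvOccurs_iff p.1 tl (pvKeyGood p hp).1 (pvKeyGood p hp).2)]
    exact ⟨i, hi, L, hL, hw.symm ▸ rfl⟩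
  · rintro ⟨p, hp, hv, hin⟩
    rw [← pvOccurs_iff p.1 tl (pvKeyGood p hp).1 (pvKeyGood p hp).2] at hin
    obtain ⟨i, hi, L, hL, hs⟩ := hin
    refine ⟨i, hi, L, hL, ?_⟩
    rw [show pvKeyRule = PySem.Dict.mk pvKeyPairs from rfl, pvGetMk _ pvKeyNodup]
    exact ⟨p, hp, hs.symm, hv⟩

theorem pvScan_mem (fired : PySem.Set Int) (t : String) (r : Int) :
    r ∈ pvScan fired t ↔ r ∈ fired ∨ pvHits r t := by
  unfold pvScan pvHits
  cases h : pvExactRule.get? (PySem.Str.strip (PySem.Str.lower t)) with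
  | none =>
    rw [pvScanWin_mem, pvWinHit_iff]
    constructor
    · rintro (h' | h'); exacts [Or.inl h', Or.inr (Or.inl h')]
    · rintro (h' | h' | h'); exacts [Or.inl h', Or.inr h', absurd h' (by simp)]
  | some r' =>
    rw [PySem.Set.mem_add, pvScanWin_mem, pvWinHit_iff]
    simp only [Option.some.injEq]
    constructor
    · rintro ((h' | h') | rfl)
      · exact Or.inl h'
      · exact Or.inr (Or.inl h')
      · exact Or.inr (Or.inr rfl)
    · rintro (h' | h' | rfl)
      · exact Or.inl (Or.inl h')
      · exact Or.inl (Or.inr h')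
      · exact Or.inr rfl

theorem pvFired_mem (techs : List String) (r : Int) :
    r ∈ techs.foldl pvScan PySem.Set.empty ↔ ∃ t ∈ techs, pvHits r t := by
  rw [pvMemFold pvScan pvHits (fun s t y => pvScan_mem s t y) techs PySem.Set.empty r]
  simp [PySem.Set.empty]

-- the per-rule condition match: B's fired-set membership is A's `any` test
theorem pvCond (techs : List String) (j : Int) (subs exacts : List String)
    (hs : (pvKeyPairs.filter (fun p => p.2 == j)).map Prod.fst = subs)
    (he : (pvExactPairs.filter (fun p => p.2 == j)).map Prod.fst = exacts) :
    PySem.Set.contains (techs.foldl pvScan PySem.Set.empty) j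
      = (techs.map (fun t => PySem.Str.lower t)).any (fun tl =>
          subs.any (fun kw => PySem.Str.isIn kw tl)
          || exacts.any (fun e => PySem.Str.strip tl == e)) := by
  subst hs he
  rw [Bool.eq_iff_iff]
  rw [show (PySem.Set.contains (techs.foldl pvScan PySem.Set.empty) j = true)
      ↔ j ∈ techs.foldl pvScan PySem.Set.empty from PySem.Set.contains_iff _ _]
  rw [pvFired_mem]
  rw [List.any_eq_true]
  constructor
  · rintro ⟨t, ht, hhit⟩
    refine ⟨PySem.Str.lower t, List.mem_map_of_mem ht, ?_⟩
    rcases hhit with ⟨p, hp, hv, hin⟩ | hex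
    · apply Bool.or_eq_true_iff.mpr; left
      rw [List.any_eq_true]
      exact ⟨p.1, List.mem_map_of_mem (List.mem_filter.mpr ⟨hp, by simp [hv]⟩), hin⟩
    · apply Bool.or_eq_true_iff.mpr; right
      rw [show pvExactRule = PySem.Dict.mk pvExactPairs from rfl, pvGetMk _ pvExactNodup] at hex
      obtain ⟨p, hp, hw, hv⟩ := hex
      rw [List.any_eq_true]
      exact ⟨p.1, List.mem_map_of_mem (List.mem_filter.mpr ⟨hp, by simp [hv]⟩), by simp [hw]⟩
  · rintro ⟨tl, htl, hcond⟩
    obtain ⟨t, ht, rfl⟩ := List.mem_map.mp htl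
    refine ⟨t, ht, ?_⟩
    rcases Bool.or_eq_true_iff.mp hcond with hsub | hex
    · obtain ⟨kw, hkw, hin⟩ := List.any_eq_true.mp hsub
      obtain ⟨p, hpf, rfl⟩ := List.mem_map.mp hkw
      obtain ⟨hmem, hval⟩ := List.mem_filter.mp hpf
      exact Or.inl ⟨p, hmem, beq_iff_eq.mp hval, hin⟩
    · obtain ⟨e, he', heq⟩ := List.any_eq_true.mp hex
      obtain ⟨p, hpf, rfl⟩ := List.mem_map.mp he'
      obtain ⟨hmem, hval⟩ := List.mem_filter.mp hpf
      refine Or.inr ?_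
      rw [show pvExactRule = PySem.Dict.mk pvExactPairs from rfl, pvGetMk _ pvExactNodup]
      exact ⟨p, hmem, (beq_iff_eq.mp heq).symm, beq_iff_eq.mp hval⟩

theorem pvEnum : PySem.List.enumerate pvRuleTags =
    [((0 : Int), ["wordpress", "wp", "php"]), (1, ["php"]), (2, ["aspnet"]), (3, ["iis", "microsoft", "windows"]),
     (4, ["nginx"]), (5, ["linux"]), (6, ["windows"]), (7, ["laravel", "php"]), (8, ["django", "python"]),
     (9, ["flask", "python"]), (10, ["drupal", "php"]), (11, ["joomla", "php"]),
     (12, ["jquery", "javascript", "js"]), (13, ["react", "javascript", "js"]),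
     (14, ["vue", "javascript", "js"]), (15, ["angular", "javascript", "js"]),
     (16, ["nodejs", "javascript", "js"]), (17, ["nuxt", "javascript", "js"])] := by
  simp [pvRuleTags, PySem.List.enumerate_cons, PySem.List.enumerate_nil]

-- ===== VERDICT (by name: the statement is the Claim_ definition above) =====
theorem build_tags_for_technologies_py_spec : Claim_equal_build_tags_for_technologies_py := by
  intro techs _
  unfold Spec_build_tags_for_technologies_py
  rw [pvA_eq_fold techs]
  unfold build_tags_for_technologies_py_alt
  simp only []
  have hfold : (PySem.List.enumerate pvRuleTags).foldl
      (fun (tags : PySem.Set String) p =>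
        if PySem.Set.contains (techs.foldl pvScan PySem.Set.empty) p.1 then tags.update p.2 else tags)
      PySem.Set.empty
      = pvRulesA.foldl (pvStepA (techs.map (fun t => PySem.Str.lower t))) PySem.Set.empty := by
    rw [pvEnum]
    refine pvFoldl_rel _ _ _ pvRulesA ?_ PySem.Set.empty
    unfold pvRulesA
    simp only [List.forall₂_cons, List.Forall₂.nil]
    refine ⟨?_, ?_, ?_, ?_, ?_, ?_, ?_, ?_, ?_, ?_, ?_, ?_, ?_, ?_, ?_, ?_, ?_, ?_, trivial⟩
    all_goals intro s
    · rw [pvCond techs 0 ["wordpress"] [] (by decide) (by decide)]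
      simp only [pvStepA, List.any_cons, List.any_nil, Bool.or_false]
    · rw [pvCond techs 1 ["php"] [] (by decide) (by decide)]
      simp only [pvStepA, List.any_cons, List.any_nil, Bool.or_false]
    · rw [pvCond techs 2 ["asp.net", "aspnet"] [] (by decide) (by decide)]
      simp only [pvStepA, List.any_cons, List.any_nil, Bool.or_false]
    · rw [pvCond techs 3 ["iis"] [] (by decide) (by decide)]
      simp only [pvStepA, List.any_cons, List.any_nil, Bool.or_false]
    · rw [pvCond techs 4 ["nginx"] [] (by decide) (by decide)]
      simp only [pvStepA, List.any_cons, List.any_nil, Bool.or_false]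
    · rw [pvCond techs 5 ["ubuntu", "debian", "centos", "red hat", "redhat"] [] (by decide) (by decide)]
      simp only [pvStepA, List.any_cons, List.any_nil, Bool.or_false, Bool.or_assoc]
    · rw [pvCond techs 6 ["windows server"] [] (by decide) (by decide)]
      simp only [pvStepA, List.any_cons, List.any_nil, Bool.or_false]
    · rw [pvCond techs 7 ["laravel"] [] (by decide) (by decide)]
      simp only [pvStepA, List.any_cons, List.any_nil, Bool.or_false]
    · rw [pvCond techs 8 ["django"] [] (by decide) (by decide)]
      simp only [pvStepA, List.any_cons, List.any_nil, Bool.or_false]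
    · rw [pvCond techs 9 ["flask"] [] (by decide) (by decide)]
      simp only [pvStepA, List.any_cons, List.any_nil, Bool.or_false]
    · rw [pvCond techs 10 ["drupal"] [] (by decide) (by decide)]
      simp only [pvStepA, List.any_cons, List.any_nil, Bool.or_false]
    · rw [pvCond techs 11 ["joomla"] [] (by decide) (by decide)]
      simp only [pvStepA, List.any_cons, List.any_nil, Bool.or_false]
    · rw [pvCond techs 12 ["jquery"] [] (by decide) (by decide)]
      simp only [pvStepA, List.any_cons, List.any_nil, Bool.or_false]
    · rw [pvCond techs 13 ["react"] [] (by decide) (by decide)]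
      simp only [pvStepA, List.any_cons, List.any_nil, Bool.or_false]
    · rw [pvCond techs 14 ["vue.js", "vuejs"] ["vue"] (by decide) (by decide)]
      simp only [pvStepA, List.any_cons, List.any_nil, Bool.or_false, Bool.or_assoc]
    · rw [pvCond techs 15 ["angular"] [] (by decide) (by decide)]
      simp only [pvStepA, List.any_cons, List.any_nil, Bool.or_false]
    · rw [pvCond techs 16 ["node.js", "nodejs"] ["node"] (by decide) (by decide)]
      simp only [pvStepA, List.any_cons, List.any_nil, Bool.or_false, Bool.or_assoc]
    · rw [pvCond techs 17 ["nuxt.js", "nuxtjs"] ["nuxt"] (by decide) (by decide)]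
      simp only [pvStepA, List.any_cons, List.any_nil, Bool.or_false, Bool.or_assoc]
  rw [hfold]
  generalize pvRulesA.foldl (pvStepA (techs.map fun t => PySem.Str.lower t)) PySem.Set.empty = tg
  by_cases h : tg.isEmpty
  · rw [if_pos h, if_pos h]
    rw [List.isEmpty_iff] at h
    rw [h]
    rfl
  · rw [if_neg h, if_neg h]
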